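-- pv_equiv track=rewrite | github.com/HaTinnng/HaTinBot | Cogs/CloverFit.py | _find_runs_row
-- ===== SOURCE A (Python) =====
-- GRID_W = 5
--
-- GRID_H = 3
--
-- def _find_runs_row(grid, ch):
--     H5, H4, H3 = [], [], []
--     for r in range(GRID_H):
--         c = 0
--         while c < GRID_W:
--             if grid[r][c] != ch:
--                 c += 1; continue
--             j = c
--             while j < GRID_W and grid[r][j] == ch:
--                 j += 1
--             run_len = j - c
--             coords = [(r, x) for x in range(c, j)]
--             if run_len >= 5:
--                 H5.append(coords[:5])
--             elif run_len == 4: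
--                 H4.append(coords)
--             elif run_len == 3:
--                 H3.append(coords)
--             c = j
--     return H5, H4, H3
-- ===== SOURCE B (Python) =====
-- GRID_W = 5
--
-- GRID_H = 3
--
-- def _find_runs_row(grid, ch):
--     # one pass per row with a running run-length counter, flushed on mismatch/end
--     H5, H4, H3 = [], [], []
--     for r in range(GRID_H):
--         run = 0
--         for c in range(GRID_W + 1):
--             if c < GRID_W and grid[r][c] == ch:
--                 run += 1
--             else:
--                 if run >= 3:
--                     coords = [(r, x) for x in range(c - run, c - run + min(run, 5))]
--                     (H5 if run >= 5 else H4 if run == 4 else H3).append(coords)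
--                 run = 0
--     return H5, H4, H3
-- ===== Notes on version B (the rewrite author's own statement) =====
-- stated objective: alternative
-- what changed: Replaces A's find-start/scan-forward nested while loops with a single for-loop per row that maintains a running run-length counter and flushes a completed run on mismatch or row end, reconstructing coordinates arithmetically from the counter.
import Mathlib
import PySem

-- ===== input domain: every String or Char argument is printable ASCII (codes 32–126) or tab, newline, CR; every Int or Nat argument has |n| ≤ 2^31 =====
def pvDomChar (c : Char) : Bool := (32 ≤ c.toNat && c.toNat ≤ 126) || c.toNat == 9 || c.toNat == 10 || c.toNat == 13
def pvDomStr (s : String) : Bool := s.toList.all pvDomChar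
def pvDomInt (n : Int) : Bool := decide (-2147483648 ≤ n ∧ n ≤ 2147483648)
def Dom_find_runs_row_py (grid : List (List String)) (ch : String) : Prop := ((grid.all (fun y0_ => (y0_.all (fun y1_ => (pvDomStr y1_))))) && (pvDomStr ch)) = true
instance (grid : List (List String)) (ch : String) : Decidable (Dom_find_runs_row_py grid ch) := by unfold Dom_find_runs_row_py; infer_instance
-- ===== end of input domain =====

-- B is an alternative same-cost decomposition (running run-length counter, flush at mismatch/row end)
-- instead of A's find-start/scan-forward nested whiles; equal return value on Pre_ (grid with ≥3 rows of ≥5 cells).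

-- ===== PORT A =====
-- grid[r][c] (raises excluded by Pre_)
def pvCell (grid : List (List String)) (r c : Nat) : Option String :=
  (PySem.List.pyGet? grid (r : Int)).bind (fun row => PySem.List.pyGet? row (c : Int))

abbrev pvSt := (List (List (Int × Int))) × (List (List (Int × Int))) × (List (List (Int × Int)))

-- inner 'while j < GRID_W and grid[r][j] == ch: j += 1'
def pvRunEnd (grid : List (List String)) (ch : String) (r j : Nat) : Nat :=
  if _h : j < 5 then
    if pvCell grid r j = some ch then pvRunEnd grid ch r (j + 1) else j
  else j
termination_by 5 - j

theorem pvRunEnd_gt (grid : List (List String)) (ch : String) (r c : Nat)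
    (hc : c < 5) (hch : pvCell grid r c = some ch) : c < pvRunEnd grid ch r c := by
  rw [pvRunEnd]
  simp only [hc, hch, dif_pos, if_pos]
  have : ∀ j, j ≤ pvRunEnd grid ch r j := by
    intro j
    fun_induction pvRunEnd grid ch r j <;> omega
  exact lt_of_lt_of_le (Nat.lt_succ_self c) (this (c + 1))

-- outer 'while c < GRID_W' loop body of A
def pvLoopC (grid : List (List String)) (ch : String) (r c : Nat) (st : pvSt) : pvSt :=
  if _h : c < 5 then
    if hne : ¬ (pvCell grid r c = some ch) then pvLoopC grid ch r (c + 1) st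
    else
      let j := pvRunEnd grid ch r c
      let run_len := j - c
      let coords := (PySem.List.pyRange (c : Int) (j : Int) 1).map (fun x => ((r : Int), x))
      let st' : pvSt :=
        if run_len ≥ 5 then (st.1 ++ [coords.take 5], st.2.1, st.2.2)
        else if run_len = 4 then (st.1, st.2.1 ++ [coords], st.2.2)
        else if run_len = 3 then (st.1, st.2.1, st.2.2 ++ [coords])
        else st
      pvLoopC grid ch r j st'
  else st
termination_by 5 - c
decreasing_by
  · omega
  · have := pvRunEnd_gt grid ch r c _h (by simpa using hne)
    omega

def find_runs_row_py (grid : List (List String)) (ch : String) : (List (List (Int × Int))) × (List (List (Int × Int))) × (List (List (Int × Int))) :=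
  (PySem.List.pyRange 0 3 1).foldl (fun st r => pvLoopC grid ch r.toNat 0 st) ([], [], [])

-- ===== PORT B =====
-- flush the current run counter (body of B's 'else' branch)
def pvFlush (r run c : Nat) (st : pvSt) : pvSt :=
  if run ≥ 3 then
    let coords := (PySem.List.pyRange ((c : Int) - run) ((c : Int) - run + min run 5) 1).map
      (fun x => ((r : Int), x))
    if run ≥ 5 then (st.1 ++ [coords], st.2.1, st.2.2)
    else if run = 4 then (st.1, st.2.1 ++ [coords], st.2.2)
    else (st.1, st.2.1, st.2.2 ++ [coords])
  else st

-- B's inner 'for c in range(GRID_W + 1)' loop over one row, threading (run, state)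
def pvRowB (grid : List (List String)) (ch : String) (r : Nat) (st : pvSt) : pvSt :=
  ((PySem.List.pyRange 0 6 1).foldl
    (fun (p : Nat × pvSt) cI =>
      let c := cI.toNat
      if c < 5 ∧ pvCell grid r c = some ch then (p.1 + 1, p.2)
      else (0, pvFlush r p.1 c p.2))
    (0, st)).2

def find_runs_row_py_alt (grid : List (List String)) (ch : String) : (List (List (Int × Int))) × (List (List (Int × Int))) × (List (List (Int × Int))) :=
  (PySem.List.pyRange 0 3 1).foldl (fun st r => pvRowB grid ch r.toNat st) ([], [], [])

-- ===== PRECONDITION & SPEC =====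
-- A indexes grid[r][c] for r in range(3), c in range(5); it raises IndexError otherwise.
def Pre_find_runs_row_py (grid : List (List String)) (ch : String) : Prop :=
  3 ≤ grid.length ∧ ∀ row ∈ grid.take 3, 5 ≤ row.length
instance (grid : List (List String)) (ch : String) : Decidable (Pre_find_runs_row_py grid ch) := by
  unfold Pre_find_runs_row_py; infer_instance

def pvWitness_find_runs_row_py : List (List String) × String :=
  ([["a", "a", "a", "b", "b"], ["b", "a", "a", "a", "a"], ["a", "a", "a", "a", "a"]], "a")

def Spec_find_runs_row_py (grid : List (List String)) (ch : String) (out : (List (List (Int × Int))) × (List (List (Int × Int))) × (List (List (Int × Int)))) : Prop := out = find_runs_row_py_alt grid ch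
instance (grid : List (List String)) (ch : String) (out : (List (List (Int × Int))) × (List (List (Int × Int))) × (List (List (Int × Int)))) : Decidable (Spec_find_runs_row_py grid ch out) := by unfold Spec_find_runs_row_py; infer_instance

-- ===== CLAIM (what is proved, stated in full; the proofs are below) =====
def Claim_equal_find_runs_row_py : Prop := ∀ (grid : List (List String)) (ch : String), Dom_find_runs_row_py grid ch → Pre_find_runs_row_py grid ch → Spec_find_runs_row_py grid ch (find_runs_row_py grid ch)

-- ===== LEMMAS AND PROOFS =====

theorem pvRow_eq (grid : List (List String)) (ch : String) (r : Nat)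
    (s0 s1 s2 s3 s4 : String) (t : List String)
    (hrow : PySem.List.pyGet? grid (r : Int) = some (s0 :: s1 :: s2 :: s3 :: s4 :: t))
    (st : pvSt) : pvLoopC grid ch r 0 st = pvRowB grid ch r st := by
  have hc0 : pvCell grid r 0 = some s0 := by simp [pvCell, hrow, PySem.List.pyGet?_of_nonneg]
  have hc1 : pvCell grid r 1 = some s1 := by simp [pvCell, hrow, PySem.List.pyGet?_of_nonneg]
  have hc2 : pvCell grid r 2 = some s2 := by simp [pvCell, hrow, PySem.List.pyGet?_of_nonneg]
  have hc3 : pvCell grid r 3 = some s3 := by simp [pvCell, hrow, PySem.List.pyGet?_of_nonneg]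
  have hc4 : pvCell grid r 4 = some s4 := by simp [pvCell, hrow, PySem.List.pyGet?_of_nonneg]
  have h6 : PySem.List.pyRange 0 6 1 = [0, 1, 2, 3, 4, 5] := by decide
  by_cases e0 : s0 = ch <;> by_cases e1 : s1 = ch <;> by_cases e2 : s2 = ch <;>
    by_cases e3 : s3 = ch <;> by_cases e4 : s4 = ch <;>
    simp [pvLoopC, pvRunEnd, pvRowB, pvFlush, hc0, hc1, hc2, hc3, hc4, e0, e1, e2, e3, e4, h6,
      PySem.List.pyRange_one, List.range_succ]

theorem find_runs_row_py_spec : Claim_equal_find_runs_row_py := by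
  intro grid ch _hdom hpre
  unfold Spec_find_runs_row_py
  obtain ⟨hlen, hrows⟩ := hpre
  match grid, hlen with
  | g0 :: g1 :: g2 :: rest, _ =>
    have h0 : 5 ≤ g0.length := hrows g0 (by simp)
    have h1 : 5 ≤ g1.length := hrows g1 (by simp)
    have h2 : 5 ≤ g2.length := hrows g2 (by simp)
    match g0, h0 with
    | a0 :: a1 :: a2 :: a3 :: a4 :: ta, _ =>
    match g1, h1 with
    | b0 :: b1 :: b2 :: b3 :: b4 :: tb, _ =>
    match g2, h2 with
    | c0 :: c1 :: c2 :: c3 :: c4 :: tc, _ =>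
    have h3 : PySem.List.pyRange 0 3 1 = [0, 1, 2] := by decide
    simp only [find_runs_row_py, find_runs_row_py_alt, h3, List.foldl]
    rw [pvRow_eq _ ch _ c0 c1 c2 c3 c4 tc (by simp [PySem.List.pyGet?_of_nonneg]),
        pvRow_eq _ ch _ b0 b1 b2 b3 b4 tb (by simp [PySem.List.pyGet?_of_nonneg]),
        pvRow_eq _ ch _ a0 a1 a2 a3 a4 ta (by simp [PySem.List.pyGet?_of_nonneg])]
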